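-- pv_equiv track=rewrite | github.com/NicholasBermingham/Persistent_Cup_Length | python implementation.py | check_Coboundary
-- ===== SOURCE A (Python) =====
-- def matrix_Multiplication_for_Sparse_Arrays(A,B):
--     #Given the sparse matrix notation of oineus which lists columns with a nonzero entry assuming Z_2 coefficients, compute their matrix multiplication A.B
--     #I am assuming size A = size B
--     AB = []
--     m = len(B)
--     for j in range(m):
--         C = set([])
--         for i in B[j]:
--             C = C^set(A[i])
--         AB.append(list(C))
--     for i in range(m):
--         AB[i].sort()
--     return AB
--
-- def check_Coboundary(Pivots, U, sigma, length):
--     vector = [[]]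
--     for k in sigma:
--         if k >= length:
--             vector[0].append(k)
--     image = matrix_Multiplication_for_Sparse_Arrays(U,vector)
--     result = []
--     for k in image[0]:
--         if k>= length:
--             result.append(k)
--     sigma_is_coboundary = set(result).issubset(Pivots)
--     return sigma_is_coboundary
-- ===== SOURCE B (Python) =====
-- def check_Coboundary(Pivots, U, sigma, length):
--     # Parity-counting: an element lies in the Z_2 coboundary iff it occurs in an
--     # odd number of the selected columns; no symmetric-difference sets, no sort.
--     counts = {}
--     for k in sigma:
--         if k >= length:
--             for e in set(U[k]):
--                 counts[e] = counts.get(e, 0) + 1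
--     return all(c % 2 == 0 or e < length or e in Pivots
--                for e, c in counts.items())
-- ===== Notes on version B (the rewrite author's own statement) =====
-- stated objective: simpler
-- what changed: B replaces A's matrix-multiply helper (building a one-column sparse matrix, accumulating Z_2 symmetric differences of sets, sorting the result, re-filtering and a final set.issubset) by a single parity-counting pass over the selected columns with a dict, returning all(count even, below-length, or pivot) over its items.
import Mathlib
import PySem

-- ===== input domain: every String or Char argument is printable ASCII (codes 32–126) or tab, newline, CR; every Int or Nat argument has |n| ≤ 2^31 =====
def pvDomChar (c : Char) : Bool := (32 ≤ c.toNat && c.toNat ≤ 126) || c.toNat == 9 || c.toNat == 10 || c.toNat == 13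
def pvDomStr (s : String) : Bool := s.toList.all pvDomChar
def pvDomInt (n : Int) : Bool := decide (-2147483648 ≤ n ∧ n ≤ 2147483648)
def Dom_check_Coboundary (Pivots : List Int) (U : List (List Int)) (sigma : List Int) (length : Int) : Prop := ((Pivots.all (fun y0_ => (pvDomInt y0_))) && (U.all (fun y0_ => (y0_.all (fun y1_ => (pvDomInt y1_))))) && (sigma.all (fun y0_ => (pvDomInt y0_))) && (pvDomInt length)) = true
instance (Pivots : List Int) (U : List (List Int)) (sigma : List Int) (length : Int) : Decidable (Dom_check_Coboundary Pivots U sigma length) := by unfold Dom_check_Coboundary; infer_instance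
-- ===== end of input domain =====

-- B replaces A's symmetric-difference set accumulation (plus vector-building and sort)
-- by one parity-counting pass over the selected columns (objective: simpler/alternative).

-- ===== PORT A =====
def matrix_Multiplication_for_Sparse_Arrays (A B : List (List Int)) : List (List Int) :=
  let m : Int := (B.length : Int)
  let AB : List (List Int) :=
    (PySem.List.pyRange 0 m 1).foldl (fun AB j =>
      let C : PySem.Set Int :=
        ((PySem.List.pyGet? B j).getD []).foldl
          (fun C i => PySem.Set.symmDiff C (PySem.Set.ofList ((PySem.List.pyGet? A i).getD [])))
          PySem.Set.empty
      AB ++ [C]) []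
  -- AB[i].sort() in place; list(C)'s hash order is irrelevant after sorting
  (PySem.List.pyRange 0 m 1).foldl (fun AB i =>
    PySem.List.pySetD AB i (PySem.List.sorted ((PySem.List.pyGet? AB i).getD []) (fun x => x) false)) AB

def check_Coboundary (Pivots : List Int) (U : List (List Int)) (sigma : List Int) (length : Int) : Bool :=
  let vector : List (List Int) :=
    [sigma.foldl (fun v k => if k ≥ length then v ++ [k] else v) []]
  let image := matrix_Multiplication_for_Sparse_Arrays U vector
  let result : List Int :=
    ((PySem.List.pyGet? image 0).getD []).foldl (fun r k => if k ≥ length then r ++ [k] else r) []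
  PySem.Set.issubset (PySem.Set.ofList result) Pivots

-- ===== PORT B =====
-- the inner loop iterates a Python set; the resulting counts (and the order-insensitive
-- 'all') do not depend on that iteration order, so iterating the Set's list is exact
def check_Coboundary_alt (Pivots : List Int) (U : List (List Int)) (sigma : List Int) (length : Int) : Bool :=
  let counts : PySem.Dict Int Int :=
    sigma.foldl (fun d k =>
      if k ≥ length then
        (PySem.Set.ofList ((PySem.List.pyGet? U k).getD [])).foldl
          (fun d e => d.insert e (d.getD e 0 + 1)) d
      else d) PySem.Dict.empty
  counts.items.all (fun p =>
    (PySem.Int.mod p.2 2 == 0) || decide (p.1 < length) || Pivots.contains p.1)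

-- ===== PRECONDITION & SPEC =====
-- Pre_ excludes exactly the inputs where Python A raises IndexError: a selected
-- sigma entry k (k ≥ length) that is not a valid (possibly negative) index into U.
def Pre_check_Coboundary (Pivots : List Int) (U : List (List Int)) (sigma : List Int) (length : Int) : Prop :=
  ∀ k ∈ sigma, length ≤ k → PySem.Raise.InRange U.length k
instance (Pivots : List Int) (U : List (List Int)) (sigma : List Int) (length : Int) : Decidable (Pre_check_Coboundary Pivots U sigma length) := by unfold Pre_check_Coboundary; infer_instance

def pvWitness_check_Coboundary : List Int × List (List Int) × List Int × Int := ([1, 2], [[1, 2], [2]], [0, 1], 0)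

def Spec_check_Coboundary (Pivots : List Int) (U : List (List Int)) (sigma : List Int) (length : Int) (out : Bool) : Prop := out = check_Coboundary_alt Pivots U sigma length
instance (Pivots : List Int) (U : List (List Int)) (sigma : List Int) (length : Int) (out : Bool) : Decidable (Spec_check_Coboundary Pivots U sigma length out) := by unfold Spec_check_Coboundary; infer_instance

-- ===== CLAIM (what is proved, stated in full; the proofs are below) =====
def Claim_equal_check_Coboundary : Prop := ∀ (Pivots : List Int) (U : List (List Int)) (sigma : List Int) (length : Int), Dom_check_Coboundary Pivots U sigma length → Pre_check_Coboundary Pivots U sigma length → Spec_check_Coboundary Pivots U sigma length (check_Coboundary Pivots U sigma length)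

-- ===== LEMMAS AND PROOFS =====

-- membership after a fold of symmetric differences = parity of hit count
theorem pv_mem_foldl_symmDiff (g : Int → List Int) (l : List Int) (e : Int) :
    ∀ C : PySem.Set Int,
      (e ∈ l.foldl (fun C k => PySem.Set.symmDiff C (PySem.Set.ofList (g k))) C ↔
        ¬ ((e ∈ C) ↔ (l.countP (fun k => decide (e ∈ g k))) % 2 = 1)) := by
  induction l with
  | nil => intro C; simp
  | cons k t ih =>
    intro C
    rw [List.foldl_cons, ih, List.countP_cons]
    by_cases h : e ∈ g k <;>
      simp [h, PySem.Set.mem_symmDiff, PySem.Set.mem_ofList] <;>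
      constructor <;> intro h1 <;> by_cases h2 : e ∈ C <;> simp_all <;> omega

theorem pv_count_flatMap (g : Int → List Int) (l : List Int) (e : Int) :
    (l.flatMap (fun k => PySem.Set.ofList (g k))).count e
      = l.countP (fun k => decide (e ∈ g k)) := by
  induction l with
  | nil => simp
  | cons k t ih =>
    rw [List.flatMap_cons, List.count_append, List.countP_cons, ih]
    by_cases h : e ∈ g k
    · rw [List.count_eq_one_of_mem (PySem.Set.nodup_ofList _) (by simpa [PySem.Set.mem_ofList] using h)]
      simp [h, Nat.add_comm]
    · rw [List.count_eq_zero_of_not_mem (by simpa [PySem.Set.mem_ofList] using h)]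
      simp [h]

theorem pv_counts_flat (g : Int → List Int) (l : List Int) :
    ∀ d : PySem.Dict Int Int,
      l.foldl (fun d k => (PySem.Set.ofList (g k)).foldl
          (fun d e => d.insert e (d.getD e 0 + 1)) d) d
        = (l.flatMap (fun k => PySem.Set.ofList (g k))).foldl
            (fun d e => d.insert e (d.getD e 0 + 1)) d := by
  induction l with
  | nil => intro d; simp
  | cons k t ih => intro d; rw [List.foldl_cons, ih, List.flatMap_cons, List.foldl_append]

theorem pv_matmul_single (A : List (List Int)) (v : List Int) :
    matrix_Multiplication_for_Sparse_Arrays A [v]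
      = [PySem.List.sorted
          (v.foldl (fun C i =>
            PySem.Set.symmDiff C (PySem.Set.ofList ((PySem.List.pyGet? A i).getD [])))
            PySem.Set.empty) (fun x => x) false] := by
  unfold matrix_Multiplication_for_Sparse_Arrays
  have h1 : PySem.List.pyRange 0 ((List.length [v] : Int)) 1 = [0] := by
    simpa using PySem.List.pyRange_one_singleton 0
  simp only [h1, List.foldl_cons, List.foldl_nil]
  simp [PySem.List.pyGet?, PySem.List.pySetD, PySem.List.pySet?, PySem.List.pyIdx?]

theorem check_Coboundary_key (Pivots : List Int) (U : List (List Int)) (sigma : List Int) (length : Int) :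
    check_Coboundary Pivots U sigma length = check_Coboundary_alt Pivots U sigma length := by
  unfold check_Coboundary check_Coboundary_alt
  simp only []
  set g : Int → List Int := fun k => (PySem.List.pyGet? U k).getD [] with hg
  set sel : List Int := sigma.filter (fun k => decide (k ≥ length)) with hsel
  set L : List Int := sel.flatMap (fun k => PySem.Set.ofList (g k)) with hL
  -- A side
  have hvec : sigma.foldl (fun v k => if k ≥ length then v ++ [k] else v) ([] : List Int) = sel := by
    simpa using PySem.List.foldl_append_ite_eq_filter (fun k => k ≥ length) sigma []
  rw [hvec, pv_matmul_single]
  set C : PySem.Set Int :=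
    sel.foldl (fun C i => PySem.Set.symmDiff C (PySem.Set.ofList (g i))) PySem.Set.empty with hC
  have hone : (PySem.List.pyGet? [PySem.List.sorted C (fun x => x) false] (0:Int)).getD []
      = PySem.List.sorted C (fun x => x) false := rfl
  rw [hone]
  have hres : (PySem.List.sorted C (fun x => x) false).foldl
      (fun r k => if k ≥ length then r ++ [k] else r) ([] : List Int)
      = (PySem.List.sorted C (fun x => x) false).filter (fun k => decide (k ≥ length)) := by
    simpa using PySem.List.foldl_append_ite_eq_filter (fun k => k ≥ length)
      (PySem.List.sorted C (fun x => x) false) []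
  rw [hres]
  -- B side
  have hcounts : sigma.foldl (fun d k =>
      if k ≥ length then
        (PySem.Set.ofList ((PySem.List.pyGet? U k).getD [])).foldl
          (fun d e => d.insert e (d.getD e 0 + 1)) d
      else d) PySem.Dict.empty
      = PySem.Dict.counter L := by
    rw [PySem.List.foldl_ite_eq_foldl_filter (fun k => k ≥ length), ← hsel,
        pv_counts_flat g sel, ← hL, PySem.Dict.foldl_insert_getD_add_one_eq_counter]
  rw [hcounts, PySem.Dict.items_counter, List.all_map]
  -- both sides as propositions about parity counts
  rw [Bool.eq_iff_iff, PySem.Set.issubset_iff, List.all_eq_true]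
  have hmemC : ∀ e : Int, e ∈ C ↔ (sel.countP (fun k => decide (e ∈ g k))) % 2 = 1 := by
    intro e
    rw [hC, pv_mem_foldl_symmDiff g sel e PySem.Set.empty]
    simp [PySem.Set.empty]
  have hcount : ∀ e : Int, L.count e = sel.countP (fun k => decide (e ∈ g k)) := by
    intro e; rw [hL, pv_count_flatMap]
  simp only [Function.comp]
  simp [PySem.Set.mem_ofList, List.mem_filter, PySem.List.mem_sorted, hcount, hmemC]
  constructor
  · intro hA x hxL
    rcases Nat.even_or_odd (sel.countP (fun k => decide (x ∈ g k))) with hev | hod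
    · exact Or.inl (Or.inl (by exact_mod_cast hev.two_dvd))
    · by_cases hl : x < length
      · exact Or.inl (Or.inr hl)
      · exact Or.inr (hA x (Nat.odd_iff.mp hod) (not_lt.mp hl))
  · intro hB x hodd hlen
    have hxL : x ∈ L := by
      rw [← List.count_pos_iff, hcount x]; omega
    rcases hB x hxL with (h | h) | h
    · exfalso
      have h2 : 2 ∣ sel.countP (fun k => decide (x ∈ g k)) := by exact_mod_cast h
      omega
    · omega
    · exact h

-- ===== VERDICT (by name: the statement is the Claim_ definition above) =====
theorem check_Coboundary_spec : Claim_equal_check_Coboundary := by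
  intro Pivots U sigma length _ _
  exact check_Coboundary_key Pivots U sigma length
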